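-- pv_equiv track=rewrite | github.com/Albertree/SOAR-ARC-test | procedural_memory/base_rules/_primitives.py | zigzag_shear_grid
-- ===== SOURCE A (Python) =====
-- def zigzag_shear_grid(grid, bg=0):
--     """Find a colored rectangle/grid pattern on background and apply zigzag shear.
--     Each row of the rectangle shifts horizontally by [0, -1, 0, +1] based on
--     distance from the bottom row of the rectangle (mod 4).
--     Works for grids with internal dividers (sub-cells) — the entire row shifts."""
--     h = len(grid)
--     w = len(grid[0]) if grid else 0
--     if h == 0 or w == 0:
--         return [row[:] for row in grid]
--
--     # Find bounding box of all non-bg cells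
--     non_bg = []
--     for r in range(h):
--         for c in range(w):
--             if grid[r][c] != bg:
--                 non_bg.append((r, c))
--     if not non_bg:
--         return [row[:] for row in grid]
--
--     min_r = min(r for r, c in non_bg)
--     max_r = max(r for r, c in non_bg)
--
--     # Shift pattern indexed by distance from bottom: [0, -1, 0, +1] repeating
--     shift_pattern = [0, -1, 0, 1]
--
--     output = [[bg] * w for _ in range(h)]
--     for r in range(h):
--         if r < min_r or r > max_r:
--             # Outside the rectangle — keep as bg
--             continue
--         dist_from_bottom = max_r - r
--         shift = shift_pattern[dist_from_bottom % 4]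
--         for c in range(w):
--             if grid[r][c] != bg:
--                 nc = c + shift
--                 if 0 <= nc < w:
--                     output[r][nc] = grid[r][c]
--     return output
-- ===== SOURCE B (Python) =====
-- def zigzag_shear_grid(grid, bg=0):
--     """Zigzag-shear via per-row whole-row slicing: find first/last row with a
--     non-bg cell, then emit each band row shifted as one slice."""
--     h = len(grid)
--     w = len(grid[0]) if grid else 0
--     if h == 0 or w == 0:
--         return [row[:] for row in grid]
--
--     flags = [any(v != bg for v in row[:w]) for row in grid]
--     if not any(flags):
--         return [row[:] for row in grid]
--     min_r = flags.index(True)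
--     max_r = h - 1 - flags[::-1].index(True)
--
--     out = []
--     for r in range(h):
--         if r < min_r or r > max_r:
--             out.append([bg] * w)
--             continue
--         row = grid[r][:w]
--         s = (max_r - r) % 4
--         if s == 1:          # shift -1
--             out.append(row[1:] + [bg])
--         elif s == 3:        # shift +1
--             out.append([bg] + row[:-1])
--         else:               # shift 0
--             out.append(row[:])
--     return out
-- ===== Notes on version B (the rewrite author's own statement) =====
-- stated objective: simpler
-- what changed: B replaces A's cell-coordinate collection, per-cell bounds checks and in-place writes into a preallocated grid by per-row non-bg flags (index/rindex for the band) and whole-row slice shifts (row[1:]+[bg] / [bg]+row[:-1]), dropping the Python-level inner cell loop.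
import Mathlib
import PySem

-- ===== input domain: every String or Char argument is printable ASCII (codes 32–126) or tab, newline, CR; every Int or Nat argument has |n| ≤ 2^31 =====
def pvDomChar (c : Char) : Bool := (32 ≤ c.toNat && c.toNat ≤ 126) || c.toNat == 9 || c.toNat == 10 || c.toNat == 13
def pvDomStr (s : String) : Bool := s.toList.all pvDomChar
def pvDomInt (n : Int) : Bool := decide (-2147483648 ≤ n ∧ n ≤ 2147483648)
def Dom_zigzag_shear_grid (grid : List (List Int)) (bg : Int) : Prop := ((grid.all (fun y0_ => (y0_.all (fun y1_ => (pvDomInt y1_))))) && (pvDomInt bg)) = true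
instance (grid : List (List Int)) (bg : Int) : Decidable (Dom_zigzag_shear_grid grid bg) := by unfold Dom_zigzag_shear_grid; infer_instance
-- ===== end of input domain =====

-- B replaces A's per-cell coordinate collection and bounds-checked in-place writes by
-- per-row non-bg flags (index/rindex for the band) and whole-row slice shifts: simpler decomposition.

-- ===== PORT A =====
def zigzag_shear_grid (grid : List (List Int)) (bg : Int) : List (List Int) :=
  let h := grid.length
  let w := if grid.length ≠ 0 then (grid.getD 0 []).length else 0
  if h = 0 ∨ w = 0 then grid.map (fun row => row)  -- [row[:] for row in grid] (copy = identity on immutable lists)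
  else
    let non_bg : List (Nat × Nat) :=
      (List.range h).foldl (fun acc r =>
        (List.range w).foldl (fun acc c =>
          if (grid.getD r []).getD c 0 ≠ bg then acc ++ [(r, c)] else acc) acc) []
    if non_bg = [] then grid.map (fun row => row)
    else
      let min_r := ((PySem.List.min? (non_bg.map Prod.fst) (fun x => x)).getD 0)
      let max_r := ((PySem.List.max? (non_bg.map Prod.fst) (fun x => x)).getD 0)
      let shift_pattern : List Int := [0, -1, 0, 1]
      let output := List.replicate h (List.replicate w bg)
      (List.range h).foldl (fun out r =>
        if r < min_r ∨ max_r < r then out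
        else
          let shift := shift_pattern.getD ((max_r - r) % 4) 0
          out.set r ((List.range w).foldl (fun orow c =>
            if (grid.getD r []).getD c 0 ≠ bg then
              if 0 ≤ (c : Int) + shift ∧ (c : Int) + shift < (w : Int) then
                orow.set ((c : Int) + shift).toNat ((grid.getD r []).getD c 0)
              else orow
            else orow) (out.getD r []))) output

-- ===== PORT B =====
def zigzag_shear_grid_alt (grid : List (List Int)) (bg : Int) : List (List Int) :=
  let h := grid.length
  let w := (grid.headD []).length  -- len(grid[0]) if grid else 0
  if h = 0 ∨ w = 0 then grid.map (fun row => row)  -- [row[:] for row in grid]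
  else
    let flags := grid.map (fun row => (row.take w).any (fun v => v != bg))  -- row[:w] = take w (0 ≤ w)
    if ¬ (flags.any (fun b => b)) then grid.map (fun row => row)
    else
      let min_r := (PySem.List.index? flags true).getD 0
      let max_r := h - 1 - (PySem.List.index? flags.reverse true).getD 0
      (List.range h).map (fun r =>
        if r < min_r ∨ max_r < r then List.replicate w bg
        else
          let row := (grid.getD r []).take w
          let s := (max_r - r) % 4
          if s = 1 then row.drop 1 ++ [bg]            -- shift -1: row[1:] + [bg]
          else if s = 3 then bg :: row.dropLast        -- shift +1: [bg] + row[:-1]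
          else row)

-- ===== PRECONDITION & SPEC =====
-- Pre_ excludes ragged grids in which some row is SHORTER than row 0: there A raises IndexError.
def Pre_zigzag_shear_grid (grid : List (List Int)) (bg : Int) : Prop :=
  ∀ row ∈ grid, (grid.headD []).length ≤ row.length
instance (grid : List (List Int)) (bg : Int) : Decidable (Pre_zigzag_shear_grid grid bg) := by unfold Pre_zigzag_shear_grid; infer_instance
def pvWitness_zigzag_shear_grid : List (List Int) × Int := ([[1, 0], [0, 2], [3, 3], [0, 0]], 0)

def Spec_zigzag_shear_grid (grid : List (List Int)) (bg : Int) (out : List (List Int)) : Prop := out = zigzag_shear_grid_alt grid bg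
instance (grid : List (List Int)) (bg : Int) (out : List (List Int)) : Decidable (Spec_zigzag_shear_grid grid bg out) := by unfold Spec_zigzag_shear_grid; infer_instance

-- ===== CLAIM (what is proved, stated in full; the proofs are below) =====
def Claim_equal_zigzag_shear_grid : Prop := ∀ (grid : List (List Int)) (bg : Int), Dom_zigzag_shear_grid grid bg → Pre_zigzag_shear_grid grid bg → Spec_zigzag_shear_grid grid bg (zigzag_shear_grid grid bg)

-- ===== LEMMAS AND PROOFS =====

theorem pv_getD_set {α : Type} (l : List α) (i j : Nat) (x d : α) :
    (l.set i x).getD j d = if i = j ∧ i < l.length then x else l.getD j d := by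
  simp [List.getD_eq_getElem?_getD, List.getElem?_set]
  split_ifs with h1 h2 h3 h4 <;> simp_all <;> omega

theorem pv_inner_length (row : List Int) (bg s : Int) (w : Nat) (l : List Nat) (orow : List Int) :
    (l.foldl (fun orow c =>
      if row.getD c 0 ≠ bg then
        if 0 ≤ (c : Int) + s ∧ (c : Int) + s < (w : Int) then
          orow.set ((c : Int) + s).toNat (row.getD c 0)
        else orow
      else orow) orow).length = orow.length := by
  induction l generalizing orow with
  | nil => rfl
  | cons c l ih => simp only [List.foldl_cons]; rw [ih]; split_ifs <;> simp

theorem pv_inner_getD (row : List Int) (bg s : Int) (w : Nat) :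
    ∀ (n : Nat), n ≤ w → ∀ (j : Nat), j < w →
    (((List.range n).foldl (fun orow c =>
      if row.getD c 0 ≠ bg then
        if 0 ≤ (c : Int) + s ∧ (c : Int) + s < (w : Int) then
          orow.set ((c : Int) + s).toNat (row.getD c 0)
        else orow
      else orow) (List.replicate w bg)).getD j bg)
    = if 0 ≤ (j : Int) - s ∧ (j : Int) - s < (n : Int) ∧ row.getD ((j : Int) - s).toNat 0 ≠ bg
      then row.getD ((j : Int) - s).toNat 0 else bg := by
  intro n
  induction n with
  | zero =>
    intro _ j hj
    simp only [List.range_zero, List.foldl_nil]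
    rw [if_neg (by omega)]
    simp [List.getD_eq_getElem?_getD, List.getElem?_replicate, hj]
  | succ n ih =>
    intro hn j hj
    rw [List.range_succ, List.foldl_append, List.foldl_cons, List.foldl_nil]
    by_cases hbg : row.getD n 0 ≠ bg
    · rw [if_pos hbg]
      by_cases hb : 0 ≤ (n : Int) + s ∧ (n : Int) + s < (w : Int)
      · rw [if_pos hb]
        rw [pv_getD_set]
        rw [pv_inner_length]
        by_cases hjn : ((n : Int) + s).toNat = j
        · rw [if_pos ⟨hjn, by simp; omega⟩]
          have hjs : (j : Int) - s = (n : Int) := by omega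
          rw [if_pos (by rw [hjs]; refine ⟨by omega, by omega, ?_⟩; simpa using hbg)]
          rw [hjs]; simp
        · rw [if_neg (by intro hc; exact hjn hc.1)]
          rw [ih (by omega) j hj]
          have : (j : Int) - s ≠ (n : Int) := by omega
          by_cases hcond : 0 ≤ (j : Int) - s ∧ (j : Int) - s < ((n : Nat) : Int) ∧ row.getD ((j : Int) - s).toNat 0 ≠ bg
          · rw [if_pos hcond, if_pos ⟨hcond.1, by push_cast; omega, hcond.2.2⟩]
          · rw [if_neg hcond, if_neg (by intro hc; exact hcond ⟨hc.1, by omega, hc.2.2⟩)]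
      · rw [if_neg hb]
        rw [ih (by omega) j hj]
        -- j - s = n impossible: then 0 ≤ j - s = n+s... wait j = n + s so bounds hold; contradiction with hb
        by_cases hjs : (j : Int) - s = (n : Int)
        · exfalso; exact hb ⟨by omega, by omega⟩
        · by_cases hcond : 0 ≤ (j : Int) - s ∧ (j : Int) - s < ((n : Nat) : Int) ∧ row.getD ((j : Int) - s).toNat 0 ≠ bg
          · rw [if_pos hcond, if_pos ⟨hcond.1, by push_cast; omega, hcond.2.2⟩]
          · rw [if_neg hcond, if_neg (by intro hc; exact hcond ⟨hc.1, by omega, hc.2.2⟩)]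
    · rw [if_neg hbg]
      rw [ih (by omega) j hj]
      by_cases hjs : (j : Int) - s = (n : Int)
      · have : row.getD ((j:Int)-s).toNat 0 = bg := by
          rw [hjs]; simpa using not_not.mp hbg
        rw [if_neg (by intro hc; exact hc.2.2 this), if_neg (by intro hc; exact hc.2.2 this)]
      · by_cases hcond : 0 ≤ (j : Int) - s ∧ (j : Int) - s < ((n : Nat) : Int) ∧ row.getD ((j : Int) - s).toNat 0 ≠ bg
        · rw [if_pos hcond, if_pos ⟨hcond.1, by push_cast; omega, hcond.2.2⟩]
        · rw [if_neg hcond, if_neg (by intro hc; exact hcond ⟨hc.1, by omega, hc.2.2⟩)]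

theorem pv_row_eq (row : List Int) (bg : Int) (w d : Nat) (hw : 0 < w) (hlen : w ≤ row.length) :
    ((List.range w).foldl (fun orow c =>
      if row.getD c 0 ≠ bg then
        if 0 ≤ (c : Int) + ([0, -1, 0, 1].getD (d % 4) 0) ∧ (c : Int) + ([0, -1, 0, 1].getD (d % 4) 0) < (w : Int) then
          orow.set ((c : Int) + ([0, -1, 0, 1].getD (d % 4) 0)).toNat (row.getD c 0)
        else orow
      else orow) (List.replicate w bg))
    = (if d % 4 = 1 then (row.take w).drop 1 ++ [bg]
       else if d % 4 = 3 then bg :: (row.take w).dropLast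
       else row.take w) := by
  have htake : (row.take w).length = w := by simp [Nat.min_eq_left hlen]
  have hd4 : d % 4 = 0 ∨ d % 4 = 1 ∨ d % 4 = 2 ∨ d % 4 = 3 := by omega
  have hlenL : ∀ s : Int, ((List.range w).foldl (fun orow c =>
      if row.getD c 0 ≠ bg then
        if 0 ≤ (c : Int) + s ∧ (c : Int) + s < (w : Int) then
          orow.set ((c : Int) + s).toNat (row.getD c 0)
        else orow
      else orow) (List.replicate w bg)).length = w := by
    intro s; rw [pv_inner_length]; simp
  have hget : ∀ (j : Nat) (hj : j < w), row.getD j 0 = row[j]'(Nat.lt_of_lt_of_le hj hlen) := by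
    intro j hj; exact List.getD_eq_getElem row 0 (Nat.lt_of_lt_of_le hj hlen)
  have hzero : ∀ hd : d % 4 = 0 ∨ d % 4 = 2,
      ((List.range w).foldl (fun orow c =>
      if row.getD c 0 ≠ bg then
        if 0 ≤ (c : Int) + ([0, -1, 0, 1].getD (d % 4) 0) ∧ (c : Int) + ([0, -1, 0, 1].getD (d % 4) 0) < (w : Int) then
          orow.set ((c : Int) + ([0, -1, 0, 1].getD (d % 4) 0)).toNat (row.getD c 0)
        else orow
      else orow) (List.replicate w bg)) = row.take w := by
    intro hd
    have hs0 : ([0, -1, 0, 1] : List Int).getD (d % 4) 0 = 0 := by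
      rcases hd with hd | hd <;> rw [hd] <;> rfl
    simp only [hs0]
    apply List.ext_getElem (by rw [hlenL]; omega)
    intro j hj hj2
    have hjw : j < w := by rw [hlenL] at hj; exact hj
    rw [← List.getD_eq_getElem _ bg, pv_inner_getD row bg 0 w w le_rfl j hjw]
    simp only [Int.sub_zero, Int.toNat_natCast]
    rw [List.getElem_take, ← hget j hjw]
    split_ifs with hc
    · rfl
    · have hbgc : ¬ (row.getD j 0 ≠ bg) := fun hne => hc ⟨by omega, by exact_mod_cast hjw, hne⟩
      exact (not_not.mp hbgc).symm
  rcases hd4 with h4 | h4 | h4 | h4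
  · rw [hzero (Or.inl h4), h4, if_neg (by norm_num), if_neg (by norm_num)]
  · -- shift -1
    rw [h4, if_pos rfl]
    simp only [show ([0, -1, 0, 1] : List Int).getD 1 0 = -1 from rfl]
    apply List.ext_getElem (by rw [hlenL]; simp [htake]; omega)
    intro j hj hj2
    have hjw : j < w := by rw [hlenL] at hj; exact hj
    rw [← List.getD_eq_getElem _ bg, pv_inner_getD row bg (-1) w w le_rfl j hjw]
    have hsub : ((j : Int) - (-1)) = ((j + 1 : Nat) : Int) := by push_cast; ring
    rw [hsub, Int.toNat_natCast]
    by_cases hjl : j + 1 < w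
    · have hR : ((row.take w).drop 1 ++ [bg])[j]'hj2 = row[j+1]'(by omega) := by
        rw [List.getElem_append_left (by simp [htake]; omega)]
        rw [List.getElem_drop, List.getElem_take]
        congr 1
        omega
      rw [hR]
      by_cases hbgc : row.getD (j + 1) 0 ≠ bg
      · rw [if_pos (by refine ⟨by push_cast; omega, by push_cast; omega, hbgc⟩), hget (j + 1) hjl]
      · rw [if_neg (by intro hc; exact hbgc hc.2.2)]
        rw [← hget (j + 1) hjl]
        exact (not_not.mp hbgc).symm
    · rw [if_neg (by intro hc; exact absurd (by exact_mod_cast hc.2.1 : j + 1 < w) hjl)]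
      have hR : ((row.take w).drop 1 ++ [bg])[j]'hj2 = bg := by
        rw [List.getElem_append_right (by simp [htake]; omega)]
        simp
      rw [hR]
  · rw [hzero (Or.inr h4), h4, if_neg (by norm_num), if_neg (by norm_num)]
  · -- shift +1
    rw [h4, if_neg (by norm_num), if_pos rfl]
    simp only [show ([0, -1, 0, 1] : List Int).getD 3 0 = 1 from rfl]
    apply List.ext_getElem (by rw [hlenL]; simp [htake]; omega)
    intro j hj hj2
    have hjw : j < w := by rw [hlenL] at hj; exact hj
    rw [← List.getD_eq_getElem _ bg, pv_inner_getD row bg 1 w w le_rfl j hjw]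
    rcases Nat.eq_zero_or_pos j with hj0 | hj0
    · subst hj0
      rw [if_neg (by intro hc; exact absurd hc.1 (by push_cast; omega))]
      rfl
    · obtain ⟨i, rfl⟩ : ∃ i, j = i + 1 := ⟨j - 1, by omega⟩
      have hsub : (((i + 1 : Nat) : Int) - 1) = ((i : Nat) : Int) := by push_cast; ring
      rw [hsub, Int.toNat_natCast]
      have hR : (bg :: (row.take w).dropLast)[i + 1]'hj2 = row[i]'(by omega) := by
        rw [List.getElem_cons_succ]
        rw [List.getElem_dropLast, List.getElem_take]
      rw [hR]
      by_cases hbgc : row.getD i 0 ≠ bg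
      · rw [if_pos (by refine ⟨by push_cast; omega, by push_cast; omega, hbgc⟩), hget i (by omega)]
      · rw [if_neg (by intro hc; exact hbgc hc.2.2)]
        rw [← hget i (by omega)]
        exact (not_not.mp hbgc).symm

theorem pv_outer_map {α : Type} (h : Nat) (dflt init : α) (skip : Nat → Bool) (g : Nat → α → α) :
    ∀ n, n ≤ h →
    ((List.range n).foldl (fun out r =>
        if skip r then out else out.set r (g r (out.getD r dflt))) (List.replicate h init))
    = ((List.range n).map (fun r => if skip r then init else g r init)) ++ List.replicate (h - n) init := by
  intro n
  induction n with
  | zero => intro _; simp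
  | succ n ih =>
    intro hn
    rw [List.range_succ, List.foldl_append, List.foldl_cons, List.foldl_nil, ih (by omega)]
    rw [List.map_append, List.map_cons, List.map_nil]
    obtain ⟨k, hk⟩ : ∃ k, h - n = k + 1 := ⟨h - n - 1, by omega⟩
    have hlenm : ((List.range n).map (fun r => if skip r then init else g r init)).length = n := by simp
    have hrep : List.replicate (h - n) init = init :: List.replicate k init := by rw [hk]; rfl
    by_cases hs : skip n
    · rw [if_pos hs, if_pos hs]
      rw [hrep, List.append_assoc, show h - (n+1) = k from by omega]
      rfl
    · rw [if_neg hs, if_neg hs]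
      have hget : (((List.range n).map (fun r => if skip r then init else g r init)) ++ List.replicate (h - n) init).getD n dflt = init := by
        rw [List.getD_eq_getElem?_getD, List.getElem?_append_right (by omega), hlenm]
        simp [hk, List.getElem?_replicate]
      rw [hget]
      rw [List.set_append_right _ _ (by omega), hlenm]
      rw [hrep]
      simp only [Nat.sub_self, List.set_cons_zero]
      rw [List.append_assoc]
      rw [show k = h - (n+1) from by omega]
      simp

theorem pv_nonbg_flat (grid : List (List Int)) (bg : Int) (h w : Nat) :
    (List.range h).foldl (fun acc r =>
      (List.range w).foldl (fun acc c =>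
        if (grid.getD r []).getD c 0 ≠ bg then acc ++ [(r, c)] else acc) acc) ([] : List (Nat × Nat))
    = (List.range h).flatMap (fun r =>
        ((List.range w).filter (fun c => decide ((grid.getD r []).getD c 0 ≠ bg))).map (fun c => (r, c))) := by
  have hstep : (fun (acc : List (Nat × Nat)) (r : Nat) =>
      (List.range w).foldl (fun acc c =>
        if (grid.getD r []).getD c 0 ≠ bg then acc ++ [(r, c)] else acc) acc)
      = fun acc r => acc ++ ((List.range w).filter (fun c => decide ((grid.getD r []).getD c 0 ≠ bg))).map (fun c => (r, c)) := by
    funext acc r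
    have := PySem.List.foldl_append_if (fun c => decide ((grid.getD r []).getD c 0 ≠ bg))
      (fun c => ((r, c) : Nat × Nat)) (List.range w) acc
    simpa using this
  rw [hstep, PySem.List.foldl_append_eq_flatMap]
  simp

theorem pv_any_take (row : List Int) (p : Int → Bool) (w : Nat) (hw : w ≤ row.length) :
    ((row.take w).any p = true) ↔ ∃ c, c < w ∧ p (row.getD c 0) = true := by
  simp only [List.any_eq_true, List.mem_take_iff_getElem]
  constructor
  · rintro ⟨x, ⟨j, hj, rfl⟩, hp⟩
    exact ⟨j, by omega, by rw [List.getD_eq_getElem row 0 (by omega)]; exact hp⟩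
  · rintro ⟨c, hc, hp⟩
    exact ⟨row[c]'(by omega), ⟨c, by omega, rfl⟩, by rw [← List.getD_eq_getElem row 0 (by omega)]; exact hp⟩

theorem pv_index_spec (flags : List Bool) (k : Nat)
    (hk : PySem.List.index? flags true = some k) :
    k < flags.length ∧ flags.getD k false = true ∧ ∀ j, j < k → flags.getD j false = false := by
  rw [PySem.List.index?_eq_some_iff] at hk
  obtain ⟨pre, suf, hfl, hlen, hnot⟩ := hk
  subst hfl hlen
  have hklen : pre.length < (pre ++ true :: suf).length := by
    simp only [List.length_append, List.length_cons]; omega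
  refine ⟨hklen, ?_, ?_⟩
  · rw [List.getD_eq_getElem _ _ hklen, List.getElem_append_right (le_refl pre.length)]
    simp
  · intro j hj
    rw [List.getD_eq_getElem _ _ (by simp only [List.length_append, List.length_cons]; omega),
      List.getElem_append_left hj]
    rcases Bool.eq_false_or_eq_true pre[j] with h | h
    · exact absurd (h ▸ List.getElem_mem _) hnot
    · exact h

theorem pv_min_eq (flags : List Bool) (fsts : List Nat)
    (hmem : ∀ r, r ∈ fsts ↔ ∃ h : r < flags.length, flags[r] = true)
    (hne : fsts ≠ []) :
    (PySem.List.min? fsts (fun x => x)).getD 0 = (PySem.List.index? flags true).getD 0 := by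
  obtain ⟨m, hm⟩ : ∃ m, PySem.List.min? fsts (fun x => x) = some m := by
    cases hmin : PySem.List.min? fsts (fun x => x) with
    | none => exact absurd ((PySem.List.min?_eq_none_iff _ _).mp hmin) hne
    | some m => exact ⟨m, rfl⟩
  have hmmin := PySem.List.min?_isMin hm
  obtain ⟨hmh, hmf⟩ := (hmem m).mp (PySem.List.min?_mem hm)
  obtain ⟨k, hk⟩ : ∃ k, PySem.List.index? flags true = some k := by
    cases hidx : PySem.List.index? flags true with
    | none =>
      exact absurd ((PySem.List.index?_eq_none_iff _ _).mp hidx)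
        (by intro hno; exact hno (hmf ▸ List.getElem_mem _))
    | some k => exact ⟨k, rfl⟩
  obtain ⟨hkh, hkf, hkmin⟩ := pv_index_spec flags k hk
  rw [hm, hk]
  simp only [Option.getD_some]
  rw [List.getD_eq_getElem _ _ hkh] at hkf
  have h1 : m ≤ k := hmmin k ((hmem k).mpr ⟨hkh, hkf⟩)
  have h2 : ¬ (m < k) := fun hlt => by
    have hz := hkmin m hlt
    rw [List.getD_eq_getElem _ _ hmh] at hz
    rw [hz] at hmf
    exact Bool.false_ne_true hmf
  omega

theorem pv_max_eq (flags : List Bool) (fsts : List Nat)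
    (hmem : ∀ r, r ∈ fsts ↔ ∃ h : r < flags.length, flags[r] = true)
    (hne : fsts ≠ []) :
    (PySem.List.max? fsts (fun x => x)).getD 0
      = flags.length - 1 - (PySem.List.index? flags.reverse true).getD 0 := by
  obtain ⟨m, hm⟩ : ∃ m, PySem.List.max? fsts (fun x => x) = some m := by
    cases hmax : PySem.List.max? fsts (fun x => x) with
    | none => exact absurd ((PySem.List.max?_eq_none_iff _ _).mp hmax) hne
    | some m => exact ⟨m, rfl⟩
  have hmmax := PySem.List.max?_isMax hm
  obtain ⟨hmh, hmf⟩ := (hmem m).mp (PySem.List.max?_mem hm)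
  obtain ⟨k, hk⟩ : ∃ k, PySem.List.index? flags.reverse true = some k := by
    cases hidx : PySem.List.index? flags.reverse true with
    | none =>
      exact absurd ((PySem.List.index?_eq_none_iff _ _).mp hidx)
        (by intro hno; exact hno (List.mem_reverse.mpr (hmf ▸ List.getElem_mem _)))
    | some k => exact ⟨k, rfl⟩
  obtain ⟨hkh', hkf, hkmin⟩ := pv_index_spec flags.reverse k hk
  have hkh : k < flags.length := by simpa using hkh'
  rw [hm, hk]
  simp only [Option.getD_some]
  have hflk : flags[flags.length - 1 - k]'(by omega) = true := by
    rw [List.getD_eq_getElem _ _ hkh'] at hkf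
    rw [← hkf, List.getElem_reverse]
  have h1 : flags.length - 1 - k ≤ m := hmmax _ ((hmem _).mpr ⟨by omega, hflk⟩)
  have h2 : ¬ (flags.length - 1 - k < m) := by
    intro hlt
    have hidx2 : flags.length - 1 - m < k := by omega
    have hz := hkmin _ hidx2
    rw [List.getD_eq_getElem _ _ (by simp only [List.length_reverse]; omega),
      List.getElem_reverse] at hz
    simp only [show flags.length - 1 - (flags.length - 1 - m) = m from by omega] at hz
    rw [hz] at hmf
    exact Bool.false_ne_true hmf
  omega

theorem pv_nonempty_iff (flags : List Bool) (fsts : List Nat)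
    (hmem : ∀ r, r ∈ fsts ↔ ∃ h : r < flags.length, flags[r] = true) :
    (flags.any (fun b => b) = true) ↔ fsts ≠ [] := by
  rw [List.any_eq_true]
  constructor
  · rintro ⟨b, hb, hbt⟩
    obtain ⟨j, hj, rfl⟩ := List.mem_iff_getElem.mp hb
    intro hnil
    have := (hmem j).mpr ⟨hj, hbt⟩
    rw [hnil] at this
    exact absurd this (List.not_mem_nil)
  · intro hne
    obtain ⟨r, hr⟩ := List.exists_mem_of_ne_nil _ hne
    obtain ⟨hrh, hrf⟩ := (hmem r).mp hr
    exact ⟨flags[r], List.getElem_mem _, hrf⟩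

-- ===== VERDICT (by name: the statement is the Claim_ definition above) =====
theorem zigzag_shear_grid_spec : Claim_equal_zigzag_shear_grid := by
  intro grid bg _hdom hpre
  unfold Spec_zigzag_shear_grid
  by_cases hnil : grid = []
  · subst hnil; simp [zigzag_shear_grid, zigzag_shear_grid_alt]
  obtain ⟨row0, rest, rfl⟩ : ∃ r t, grid = r :: t := by
    cases grid with
    | nil => exact absurd rfl hnil
    | cons a t => exact ⟨a, t, rfl⟩
  simp only [zigzag_shear_grid, zigzag_shear_grid_alt]
  simp only [List.headD_cons,
    show (if (row0 :: rest).length ≠ 0 then ((row0 :: rest).getD 0 []).length else 0) = row0.length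
      from by simp]
  by_cases hw0 : row0.length = 0
  · simp [hw0]
  rw [if_neg (show ¬((row0 :: rest).length = 0 ∨ row0.length = 0) from by simp [hw0]),
    if_neg (show ¬((row0 :: rest).length = 0 ∨ row0.length = 0) from by simp [hw0])]
  simp only [pv_nonbg_flat (row0 :: rest) bg (row0 :: rest).length row0.length]
  set w := row0.length with hwdef
  set h := (row0 :: rest).length with hhdef
  set NB := (List.range h).flatMap (fun r =>
      ((List.range w).filter (fun c => decide (((row0 :: rest).getD r []).getD c 0 ≠ bg))).map
        (fun c => (r, c))) with hNB
  set FL := (row0 :: rest).map (fun row => (row.take w).any (fun v => v != bg)) with hFL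
  have hflen : FL.length = h := by simp [hFL, hhdef]
  have hwle : ∀ r : Nat, r < h → w ≤ ((row0 :: rest).getD r []).length := by
    intro r hr
    have hmemg : (row0 :: rest).getD r [] ∈ (row0 :: rest) := by
      rw [List.getD_eq_getElem _ _ (by omega)]
      exact List.getElem_mem _
    simpa using hpre _ hmemg
  have hFLget : ∀ (r : Nat) (hr : r < h),
      FL[r]'(by omega) = (((row0 :: rest).getD r []).take w).any (fun v => v != bg) := by
    intro r hr
    simp only [hFL, List.getElem_map]
    rw [List.getD_eq_getElem _ _ (show r < (row0 :: rest).length from by omega)]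
  have hNBmem : ∀ a b : Nat, ((a, b) ∈ NB) ↔
      a < h ∧ b < w ∧ ((row0 :: rest).getD a []).getD b 0 ≠ bg := by
    intro a b
    simp only [hNB, List.mem_flatMap, List.mem_map, List.mem_filter, List.mem_range,
      Prod.mk.injEq, decide_eq_true_eq]
    constructor
    · rintro ⟨r, hr, c, ⟨hc, hbg⟩, rfl, rfl⟩
      exact ⟨hr, hc, hbg⟩
    · rintro ⟨ha, hb, hbg⟩
      exact ⟨a, ha, b, ⟨hb, hbg⟩, rfl, rfl⟩
  have hmem : ∀ r : Nat, r ∈ NB.map Prod.fst ↔ ∃ hh : r < FL.length, FL[r] = true := by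
    intro r
    rw [List.mem_map]
    constructor
    · rintro ⟨⟨a, b⟩, hab, rfl⟩
      obtain ⟨ha, hb, hbg⟩ := (hNBmem a b).mp hab
      refine ⟨by omega, ?_⟩
      rw [hFLget a ha]
      exact (pv_any_take _ _ _ (hwle a ha)).mpr ⟨b, hb, by simpa using hbg⟩
    · rintro ⟨hh, hflr⟩
      have hr : r < h := by omega
      rw [hFLget r hr] at hflr
      obtain ⟨c, hc, hbg⟩ := (pv_any_take _ _ _ (hwle r hr)).mp hflr
      exact ⟨(r, c), (hNBmem r c).mpr ⟨hr, hc, by simpa using hbg⟩, rfl⟩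
  by_cases hempty : NB = []
  · have hfsts_nil : NB.map Prod.fst = [] := by rw [hempty]; rfl
    have hnotany : ¬ (FL.any (fun b => b) = true) := by
      rw [pv_nonempty_iff FL _ hmem]
      simp [hfsts_nil]
    rw [if_pos hempty, if_pos hnotany]
  · have hne : NB.map Prod.fst ≠ [] := by simpa using hempty
    have hanyT : FL.any (fun b => b) = true := (pv_nonempty_iff FL _ hmem).mpr hne
    rw [if_neg hempty, if_neg (not_not_intro hanyT)]
    have hminE := pv_min_eq FL (NB.map Prod.fst) hmem hne
    have hmaxE := pv_max_eq FL (NB.map Prod.fst) hmem hne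
    rw [hflen] at hmaxE
    simp only [hminE, hmaxE]
    set m := (PySem.List.index? FL true).getD 0 with hmdef
    set M := h - 1 - (PySem.List.index? FL.reverse true).getD 0 with hMdef
    have hbridge : (fun (out : List (List Int)) (r : Nat) =>
        if r < m ∨ M < r then out
        else out.set r ((List.range w).foldl (fun orow c =>
          if ((row0 :: rest).getD r []).getD c 0 ≠ bg then
            if 0 ≤ (c : Int) + ([0, -1, 0, 1].getD ((M - r) % 4) 0) ∧
                (c : Int) + ([0, -1, 0, 1].getD ((M - r) % 4) 0) < (w : Int) then
              orow.set ((c : Int) + ([0, -1, 0, 1].getD ((M - r) % 4) 0)).toNat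
                (((row0 :: rest).getD r []).getD c 0)
            else orow
          else orow) (out.getD r [])))
        = fun out r =>
          if (fun r => decide (r < m ∨ M < r)) r = true then out
          else out.set r ((fun r row => (List.range w).foldl (fun orow c =>
            if ((row0 :: rest).getD r []).getD c 0 ≠ bg then
              if 0 ≤ (c : Int) + ([0, -1, 0, 1].getD ((M - r) % 4) 0) ∧
                  (c : Int) + ([0, -1, 0, 1].getD ((M - r) % 4) 0) < (w : Int) then
                orow.set ((c : Int) + ([0, -1, 0, 1].getD ((M - r) % 4) 0)).toNat
                  (((row0 :: rest).getD r []).getD c 0)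
              else orow
            else orow) row) r (out.getD r [])) := by
      funext out r
      simp
    rw [hbridge]
    refine (pv_outer_map h ([] : List Int) (List.replicate w bg)
        (fun r => decide (r < m ∨ M < r))
        (fun r row => (List.range w).foldl (fun orow c =>
          if ((row0 :: rest).getD r []).getD c 0 ≠ bg then
            if 0 ≤ (c : Int) + ([0, -1, 0, 1].getD ((M - r) % 4) 0) ∧
                (c : Int) + ([0, -1, 0, 1].getD ((M - r) % 4) 0) < (w : Int) then
              orow.set ((c : Int) + ([0, -1, 0, 1].getD ((M - r) % 4) 0)).toNat
                (((row0 :: rest).getD r []).getD c 0)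
            else orow
          else orow) row) h le_rfl).trans ?_
    simp only [Nat.sub_self, List.replicate_zero, List.append_nil]
    refine List.map_inj_left.mpr ?_
    intro r hrmem
    have hr : r < h := List.mem_range.mp hrmem
    by_cases hskip : r < m ∨ M < r
    · rw [if_pos (by simpa using hskip), if_pos hskip]
    · rw [if_neg (by simpa using hskip), if_neg hskip]
      exact pv_row_eq ((row0 :: rest).getD r []) bg w (M - r) (by omega) (hwle r hr)
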